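-- pv_equiv track=rewrite | github.com/nahkim/Algorithm | programmers/pccp 모의고사/pccp1-1.py | solution
-- ===== SOURCE A (Python) =====
-- def solution(input_string):
--     answer = ''
--
--     dict_ = {}
--     for i in range(len(input_string)):
--         if input_string[i] in dict_:
--             dict_[input_string[i]] += 1
--         else:
--             dict_[input_string[i]] = 1
--
--     for i in range(len(input_string)):
--         count = 0
--
--         if dict_[input_string[i]] == -1:
--             continue
--         elif dict_[input_string[i]] > 1:
--             for j in range(dict_[input_string[i]]):
--                 if input_string[i] == input_string[i + j]:
--                     count += 1
--                 else:
--                     answer += input_string[i]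
--                     break
--             dict_[input_string[i]] = -1
--
--     if answer == "":
--         return "N"
--     answer = "".join(sorted(answer))
--     return answer
-- ===== SOURCE B (Python) =====
-- def solution(input_string):
--     # run-length view: a char belongs in the answer iff it heads more than one
--     # maximal run of equal adjacent characters
--     runs = []
--     for ch in input_string:
--         if not runs or runs[-1] != ch:
--             runs.append(ch)
--     repeated = {c for c in runs if runs.count(c) > 1}
--     if not repeated:
--         return 'N'
--     return ''.join(sorted(repeated))
-- ===== Notes on version B (the rewrite author's own statement) =====
-- stated objective: simpler
-- what changed: Replaces the count-dict plus forward window scan (with -1 sentinel marking) by a run-length pass: compress the string to its run heads and collect the characters heading more than one run.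
import Mathlib
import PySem

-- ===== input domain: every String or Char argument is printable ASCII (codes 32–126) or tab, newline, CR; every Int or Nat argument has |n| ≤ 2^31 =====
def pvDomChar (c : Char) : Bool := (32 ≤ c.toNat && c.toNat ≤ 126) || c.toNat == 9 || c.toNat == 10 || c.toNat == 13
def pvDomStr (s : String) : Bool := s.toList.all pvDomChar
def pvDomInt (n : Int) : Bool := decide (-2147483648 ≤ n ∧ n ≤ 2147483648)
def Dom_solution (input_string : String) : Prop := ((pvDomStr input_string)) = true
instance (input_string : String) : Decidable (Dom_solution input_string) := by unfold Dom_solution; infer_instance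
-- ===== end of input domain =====

-- B replaces A's count-dict plus forward window scan by a run-length pass over the
-- string (objective: simpler).  Equal return value on every input (A never raises).

-- ===== PORT A =====
-- inner 'for j in range(k)' of A: scans forward from the first occurrence i; returns
-- true exactly when it hits a mismatching character and A appends (the local 'count'
-- of A only feeds itself and is dropped).  l.getD's default is never read on the
-- indices Python reaches (a mismatch always comes first); choosing c there keeps it a
-- plain total function.
def innerLoopA (l : List Char) (c : Char) (i : Nat) (k : Nat) (j : Nat) : Bool :=
  if j < k then
    if l.getD (i + j) c = c then innerLoopA l c i k (j + 1) else true
  else false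
termination_by k - j

-- first-loop body of A: bump the count of c ('if c in dict_ … else …')
def countStep (d : PySem.Dict Char Int) (c : Char) : PySem.Dict Char Int :=
  if d.contains c then d.modify c 0 (· + 1) else d.insert c 1

-- second 'for i in range(len(input_string))' body of A, state = (answer, dict_)
def stepA (l : List Char) (st : List Char × PySem.Dict Char Int) (i : Int) :
    List Char × PySem.Dict Char Int :=
  let c := PySem.List.pyGetD l i ' '
  let k := st.2.getD c 0
  if k = -1 then st
  else if 1 < k then
    ((if innerLoopA l c i.toNat k.toNat 0 then st.1 ++ [c] else st.1),
      st.2.insert c (-1))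
  else st

def solution (input_string : String) : String :=
  let l := input_string.toList
  -- first loop: build dict_ of counts
  let d0 := (PySem.List.pyRange 0 (PySem.Chars.len l) 1).foldl
    (fun d i => countStep d (PySem.List.pyGetD l i ' '))
    PySem.Dict.empty
  -- second loop
  let st := (PySem.List.pyRange 0 (PySem.Chars.len l) 1).foldl (stepA l) ([], d0)
  -- answer is modelled as its list of characters; "".join(sorted(answer))
  if st.1 = [] then "N"
  else String.ofList (PySem.List.sorted st.1 (fun x => x) false)

-- ===== PORT B =====
def solution_alt (input_string : String) : String :=
  let l := input_string.toList
  -- the run heads: append ch when runs is empty or its last entry differs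
  let runs := l.foldl (fun rs ch => if rs.getLast? ≠ some ch then rs ++ [ch] else rs) []
  -- {c for c in runs if runs.count(c) > 1}
  let repeated := PySem.Set.ofList (runs.filter (fun c => decide (1 < runs.count c)))
  if repeated = [] then "N"
  else String.ofList (PySem.List.sorted repeated (fun x => x) false)

-- ===== PRECONDITION & SPEC =====
def Spec_solution (input_string : String) (out : String) : Prop := out = solution_alt input_string
instance (input_string : String) (out : String) : Decidable (Spec_solution input_string out) := by unfold Spec_solution; infer_instance

-- ===== CLAIM (what is proved, stated in full; the proofs are below) =====
def Claim_equal_solution : Prop := ∀ (input_string : String), Dom_solution input_string → Spec_solution input_string (solution input_string)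

-- ===== LEMMAS AND PROOFS =====
def runsD (l : List Char) : List Char :=
  match l with
  | [] => []
  | a :: t => a :: runsD (t.dropWhile (· == a))
termination_by l.length
decreasing_by simpa using Nat.lt_succ_of_le (t.length_dropWhile_le (· == a))

theorem runs_foldl_aux (t rs : List Char) (a : Char) :
    (t.foldl (fun rs ch => if rs.getLast? ≠ some ch then rs ++ [ch] else rs) (rs ++ [a])) =
      rs ++ [a] ++ runsD (t.dropWhile (· == a)) := by
  induction t generalizing rs a with
  | nil => simp [runsD]
  | cons b t2 ih =>
    by_cases hb : b = a
    · subst hb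
      simp only [List.foldl_cons, List.getLast?_append, List.getLast?_singleton,
        Option.some.injEq, not_true_eq_false, ne_eq]
      rw [if_neg (by simp)]
      simpa using ih rs b
    · simp only [List.foldl_cons, ne_eq]
      rw [if_pos (by simp [eq_comm, hb]), List.dropWhile_cons_of_neg (by simp [hb])]
      rw [show rs ++ [a] ++ [b] = (rs ++ [a]) ++ [b] by simp]
      rw [ih (rs ++ [a]) b, runsD]
      simp
theorem runs_foldl_eq (l : List Char) :
    l.foldl (fun rs ch => if rs.getLast? ≠ some ch then rs ++ [ch] else rs) [] = runsD l := by
  cases l with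
  | nil => simp [runsD]
  | cons a t =>
    simp only [List.foldl_cons, ne_eq, List.getLast?_nil]
    rw [if_pos (by simp)]
    have := runs_foldl_aux t [] a
    simpa [runsD] using this

theorem mem_runsD (l : List Char) (c : Char) : c ∈ runsD l ↔ c ∈ l := by
  induction l using runsD.induct with
  | case1 => simp [runsD]
  | case2 a t ih =>
    rw [runsD]
    by_cases hc : c = a
    · simp [hc]
    · simp only [List.mem_cons, hc, false_or]
      rw [ih]
      constructor
      · intro h
        rw [← List.takeWhile_append_dropWhile (p := (· == a)) (l := t)]
        exact List.mem_append_right _ h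
      · intro h
        rw [← List.takeWhile_append_dropWhile (p := (· == a)) (l := t)] at h
        rcases List.mem_append.1 h with h | h
        · exact absurd (by simpa using List.mem_takeWhile_imp h) hc
        · exact h

def Contig (l : List Char) (c : Char) : Prop :=
  ∃ u v, l = u ++ List.replicate (l.count c) c ++ v ∧ c ∉ u ∧ c ∉ v

theorem runsD_count_one_iff (l : List Char) (c : Char) (hc : c ∈ l) :
    (runsD l).count c = 1 ↔ Contig l c := by
  induction l using runsD.induct with
  | case1 => simp at hc
  | case2 a t ih =>
    have hsplit : t = t.takeWhile (· == a) ++ t.dropWhile (· == a) :=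
      (List.takeWhile_append_dropWhile).symm
    set tw := t.takeWhile (· == a) with htwdef
    set t' := t.dropWhile (· == a) with ht'def
    have htw_all : ∀ x ∈ tw, x = a := fun x hx => by simpa using List.mem_takeWhile_imp hx
    have hl : a :: t = (a :: tw) ++ t' := by rw [hsplit]; rfl
    have hhead : ∀ (h : t' ≠ []), ¬ (t'.head h = a) := by
      intro h
      have := List.head_dropWhile_not (· == a) (l := t) h
      simpa using this
    clear_value tw t'
    by_cases hca : c = a
    · subst hca
      rw [runsD, List.count_cons_self, ← ht'def]
      have hcnt_tw : tw.count c = tw.length :=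
        List.count_eq_length.2 (fun b hb => (htw_all b hb).symm)
      have hcnt : (c :: t).count c = 1 + tw.length + t'.count c := by
        rw [hl, List.count_append, List.count_cons_self, hcnt_tw]; omega
      constructor
      · intro h1
        have h0 : (runsD t').count c = 0 := by omega
        have hnot' : c ∉ t' := fun hm => (List.count_eq_zero.1 h0) ((mem_runsD t' c).2 hm)
        refine ⟨[], t', ?_, by simp, hnot'⟩
        have hcv : (c :: t).count c = 1 + tw.length := by
          rw [hcnt]
          have h0' := List.count_eq_zero.2 hnot'
          omega
        rw [hcv, List.nil_append, hl]
        have hrepl : (c :: tw) = List.replicate (1 + tw.length) c :=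
          List.eq_replicate_iff.2 ⟨by simp; omega, by
            intro b hb
            rcases List.mem_cons.1 hb with rfl | hb
            · rfl
            · exact htw_all b hb⟩
        rw [← hrepl]
      · rintro ⟨u, v, heq, hcu, hcv⟩
        -- head of l is c, c ∉ u forces u = []
        have hu : u = [] := by
          cases u with
          | nil => rfl
          | cons x u2 =>
            have : x = c := by
              have := congrArg (fun l => l.head?) heq
              simpa using this.symm
            exact absurd (by rw [this]; exact List.mem_cons_self) hcu
        subst hu
        simp only [List.nil_append] at heq
        -- show c ∉ t'
        have hnot' : c ∉ t' := by
          intro hm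
          have hne : t' ≠ [] := List.ne_nil_of_mem hm
          -- count c (a::t) ≥ 2 + tw.length
          have hge : 2 + tw.length ≤ (c :: t).count c := by
            have h1 : 0 < t'.count c := List.count_pos_iff.2 hm
            rw [hcnt]
            omega
          -- t' is what remains of l after 1 + tw.length elements, inside the replicate
          have hdrop : t' = (c :: t).drop (1 + tw.length) := by
            rw [hl]
            rw [List.drop_append_of_le_length (by simp only [List.length_cons]; omega)]
            simp
          have hrep : (c :: t).drop (1 + tw.length) =
              List.replicate ((c :: t).count c - (1 + tw.length)) c ++ v := by
            conv_lhs => rw [heq]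
            rw [List.drop_append_of_le_length (by rw [List.length_replicate]; omega),
              List.drop_replicate]
          have hh? : t'.head? = some c := by
            rw [hdrop, hrep, List.head?_append_of_ne_nil]
            · rw [List.head?_replicate]
              rw [if_neg (by omega)]
            · intro hrepnil
              rw [List.eq_nil_iff_length_eq_zero] at hrepnil
              rw [List.length_replicate] at hrepnil
              omega
          have hh := List.head?_eq_head hne
          rw [hh?] at hh
          exact hhead hne (Option.some.inj hh).symm
        have h0 : (runsD t').count c = 0 :=
          List.count_eq_zero.2 (fun hm => hnot' ((mem_runsD t' c).1 hm))
        omega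
    · -- c ≠ a
      have hct : c ∈ t := by
        rcases List.mem_cons.1 hc with rfl | h
        · exact absurd rfl hca
        · exact h
      have hct' : c ∈ t' := by
        rw [hsplit] at hct
        rcases List.mem_append.1 hct with h | h
        · exact absurd (htw_all c h) hca
        · exact h
      have hcnt_eq : (a :: t).count c = t'.count c := by
        rw [hl, List.count_append, List.count_cons_of_ne (by exact fun h => hca h.symm)]
        rw [show tw.count c = 0 from List.count_eq_zero.2 (fun hm => hca (htw_all c hm))]
        omega
      rw [runsD, List.count_cons_of_ne (by exact fun h => hca h.symm), ← ht'def, ih hct']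
      -- Contig t' c ↔ Contig (a :: t) c
      constructor
      · rintro ⟨u, v, heq, hcu, hcv⟩
        refine ⟨a :: tw ++ u, v, ?_, ?_, hcv⟩
        · rw [hcnt_eq]
          conv_lhs => rw [hl, heq]
          simp only [List.cons_append, List.append_assoc]
        · intro hm
          rcases List.mem_cons.1 hm with rfl | hm
          · exact hca rfl
          · rcases List.mem_append.1 hm with h | h
            · exact hca (htw_all c h)
            · exact hcu h
      · rintro ⟨u, v, heq, hcu, hcv⟩
        have hcntpos : 0 < (a :: t).count c := List.count_pos_iff.2 hc
        -- (a :: tw) is a prefix of u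
        have hpre1 : (a :: tw) <+: (a :: t) := ⟨t', hl.symm⟩
        have hpre2 : u <+: (a :: t) :=
          ⟨_, by rw [← List.append_assoc]; exact heq.symm⟩
        have hlen : (a :: tw).length ≤ u.length := by
          by_contra hlt
          push_neg at hlt
          -- l[u.length] = c but l[u.length] ∈ a :: tw, all = a
          have h1 : u.length < (a :: t).length := by
            conv_rhs => rw [heq]
            rw [List.length_append, List.length_append, List.length_replicate]
            omega
          have hall : ∀ x ∈ a :: tw, x = a := by
            intro x hx
            rcases List.mem_cons.1 hx with rfl | hx
            · rfl
            · exact htw_all x hx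
          have hue : (a :: t)[u.length]? = some c := by
            conv_lhs => rw [heq]
            rw [List.getElem?_append_left (by
              rw [List.length_append, List.length_replicate]; omega)]
            rw [List.getElem?_append_right (le_refl u.length)]
            simp only [Nat.sub_self]
            rw [List.getElem?_replicate, if_pos hcntpos]
          have hua : (a :: t)[u.length]? = some a := by
            conv_lhs => rw [hl]
            rw [List.getElem?_append_left (by simpa using hlt)]
            rw [List.getElem?_eq_getElem (by simpa using hlt)]
            exact congrArg some (hall _ (List.getElem_mem _))
          rw [hue] at hua
          exact hca (Option.some.inj hua)
        obtain ⟨u', hu'⟩ := List.prefix_of_prefix_length_le hpre1 hpre2 hlen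
        -- t' = u' ++ replicate ++ v
        have ht'eq : t' = u' ++ List.replicate (t'.count c) c ++ v := by
          have key : (a :: tw) ++ t' =
              (a :: tw) ++ (u' ++ (List.replicate ((a :: t).count c) c ++ v)) := by
            calc (a :: tw) ++ t' = a :: t := hl.symm
              _ = u ++ List.replicate ((a :: t).count c) c ++ v := heq
              _ = ((a :: tw) ++ u') ++ List.replicate ((a :: t).count c) c ++ v := by rw [hu']
              _ = (a :: tw) ++ (u' ++ (List.replicate ((a :: t).count c) c ++ v)) := by
                  simp only [List.append_assoc]
          have h2 := List.append_cancel_left key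
          rw [List.append_assoc, ← hcnt_eq]
          exact h2
        refine ⟨u', v, ht'eq, ?_, hcv⟩
        intro hm
        exact hcu (by rw [← hu']; exact List.mem_append_right _ hm)

theorem innerLoopA_iff (l : List Char) (c : Char) (i k j : Nat) :
    innerLoopA l c i k j = true ↔ ∃ j', j ≤ j' ∧ j' < k ∧ l.getD (i + j') c ≠ c := by
  have H : ∀ n j, k - j ≤ n → (innerLoopA l c i k j = true ↔ ∃ j', j ≤ j' ∧ j' < k ∧ l.getD (i + j') c ≠ c) := by
    intro n
    induction n with
    | zero =>
      intro j hj; rw [innerLoopA]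
      have h : ¬ j < k := by omega
      rw [if_neg h]
      exact iff_of_false (by simp) (by rintro ⟨j', h1, h2, _⟩; omega)
    | succ n ih =>
      intro j hj; rw [innerLoopA]
      by_cases h : j < k
      · simp only [if_pos h]
        by_cases he : l.getD (i + j) c = c
        · rw [if_pos he, ih (j+1) (by omega)]
          constructor
          · rintro ⟨j', h1, h2, h3⟩; exact ⟨j', by omega, h2, h3⟩
          · rintro ⟨j', h1, h2, h3⟩
            rcases Nat.eq_or_lt_of_le h1 with rfl | hlt
            · exact absurd he h3
            · exact ⟨j', by omega, h2, h3⟩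
        · simp only [if_neg he, true_iff]
          exact ⟨j, le_refl j, h, he⟩
      · rw [if_neg h]
        exact iff_of_false (by simp) (by rintro ⟨j', h1, h2, _⟩; omega)
  exact H (k - j) j le_rfl

def condA (l : List Char) (c : Char) : Bool :=
  decide (1 < l.count c) && innerLoopA l c (l.idxOf c) (l.count c) 0

theorem count_take_idxOf (l : List Char) (c : Char) (hc : c ∈ l) :
    (l.take (l.idxOf c)).count c = 0 := by
  rw [List.count_eq_zero]
  intro hm
  have := (List.mem_take_iff_idxOf_lt hc).1 hm
  omega

theorem idxOf_add_count_le (l : List Char) (c : Char) (hc : c ∈ l) :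
    l.idxOf c + l.count c ≤ l.length := by
  have hi : l.idxOf c < l.length := List.idxOf_lt_length_of_mem hc
  have hsplit := List.take_append_drop (l.idxOf c) l
  have hcnt : l.count c = (l.take (l.idxOf c)).count c + (l.drop (l.idxOf c)).count c := by
    conv_lhs => rw [← hsplit]
    exact List.count_append
  rw [count_take_idxOf l c hc] at hcnt
  have hle : (l.drop (l.idxOf c)).count c ≤ (l.drop (l.idxOf c)).length := List.count_le_length
  rw [List.length_drop] at hle
  omega

theorem no_mismatch_iff_contig (l : List Char) (c : Char) (hc : c ∈ l) :
    (∀ j, j < l.count c → l.getD (l.idxOf c + j) c = c) ↔ Contig l c := by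
  have hi : l.idxOf c < l.length := List.idxOf_lt_length_of_mem hc
  have hik := idxOf_add_count_le l c hc
  have hcnt0 := count_take_idxOf l c hc
  have hknz : 0 < l.count c := List.count_pos_iff.2 hc
  constructor
  · intro h
    have hmrep : (l.drop (l.idxOf c)).take (l.count c) = List.replicate (l.count c) c := by
      apply List.eq_replicate_iff.2
      constructor
      · rw [List.length_take, List.length_drop]; omega
      · intro b hb
        obtain ⟨j, hj, hbj⟩ := List.getElem_of_mem hb
        rw [List.getElem_take, List.getElem_drop] at hbj
        have hjk : j < l.count c := by
          rw [List.length_take, List.length_drop] at hj; omega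
        have := h j hjk
        rw [List.getD_eq_getElem?_getD, List.getElem?_eq_getElem (by omega)] at this
        simp only [Option.getD_some] at this
        rw [← hbj]
        exact this
    have hsum : l.count c = (l.take (l.idxOf c)).count c
        + ((l.drop (l.idxOf c)).take (l.count c)).count c
        + (l.drop (l.idxOf c + l.count c)).count c := by
      conv_lhs => rw [← List.take_append_drop (l.idxOf c) l]
      conv_lhs => rw [← List.take_append_drop (l.count c) (l.drop (l.idxOf c))]
      rw [List.count_append, List.count_append, List.drop_drop]
      omega
    have hd : ((l.drop (l.idxOf c)).take (l.count c)).count c = l.count c := by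
      rw [hmrep, List.count_replicate]
      simp
    refine ⟨l.take (l.idxOf c), l.drop (l.idxOf c + l.count c), ?_, ?_, ?_⟩
    · conv_lhs => rw [← List.take_append_drop (l.idxOf c) l]
      rw [List.append_assoc]
      congr 1
      conv_lhs => rw [← List.take_append_drop (l.count c) (l.drop (l.idxOf c))]
      rw [hmrep, List.drop_drop]
    · rw [← List.count_eq_zero]; exact hcnt0
    · rw [← List.count_eq_zero]
      omega
  · rintro ⟨u, v, heq, hcu, hcv⟩
    intro j hj
    have hiu : l.idxOf c = u.length := by
      rw [heq, List.append_assoc, List.idxOf_append_of_notMem hcu]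
      have hrep : List.replicate (l.count c) c ++ v
          = c :: (List.replicate (l.count c - 1) c ++ v) := by
        conv_lhs => rw [show l.count c = (l.count c - 1) + 1 by omega]
        rw [List.replicate_succ, List.cons_append]
      rw [hrep, List.idxOf_cons_eq _ rfl]
      omega
    have hlen : l.length = u.length + l.count c + v.length := by
      conv_lhs => rw [heq]
      rw [List.length_append, List.length_append, List.length_replicate]
    have hgl : l[l.idxOf c + j]? = some c := by
      rw [hiu]
      conv_lhs => rw [heq]
      rw [List.append_assoc, List.getElem?_append_right (by omega),
        Nat.add_sub_cancel_left,
        List.getElem?_append_left (by rw [List.length_replicate]; omega),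
        List.getElem?_replicate, if_pos hj]
    rw [List.getD_eq_getElem?_getD, hgl]
    rfl

theorem condA_iff_not_contig (l : List Char) (c : Char) (hc : c ∈ l) :
    condA l c = true ↔ ¬ Contig l c := by
  have hknz : 0 < l.count c := List.count_pos_iff.2 hc
  have hiff := no_mismatch_iff_contig l c hc
  have hinner := innerLoopA_iff l c (l.idxOf c) (l.count c) 0
  rw [condA, Bool.and_eq_true, decide_eq_true_iff, hinner]
  constructor
  · rintro ⟨h1, j', _, hj2, hj3⟩ hcont
    exact hj3 (hiff.2 hcont j' hj2)
  · intro hcont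
    have hk1 : 1 < l.count c := by
      by_contra hk
      apply hcont
      have hkeq : l.count c = 1 := by omega
      have hi : l.idxOf c < l.length := List.idxOf_lt_length_of_mem hc
      refine ⟨l.take (l.idxOf c), l.drop (l.idxOf c + 1), ?_, ?_, ?_⟩
      · rw [hkeq, List.append_assoc, show List.replicate 1 c = [c] from rfl,
          List.singleton_append]
        have hcons : c :: l.drop (l.idxOf c + 1) = l.drop (l.idxOf c) := by
          conv_rhs => rw [← List.getElem_cons_drop hi]
          rw [List.getElem_idxOf hi]
        rw [hcons, List.take_append_drop]
      · rw [← List.count_eq_zero]; exact count_take_idxOf l c hc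
      · rw [← List.count_eq_zero]
        have hsplit : l.count c = (l.take (l.idxOf c)).count c + (l.drop (l.idxOf c)).count c := by
          conv_lhs => rw [← List.take_append_drop (l.idxOf c) l]
          exact List.count_append
        have hdropc : (l.drop (l.idxOf c)).count c
            = 1 + (l.drop (l.idxOf c + 1)).count c := by
          conv_lhs => rw [← List.getElem_cons_drop hi, List.getElem_idxOf hi]
          rw [List.count_cons_self]
          omega
        rw [count_take_idxOf l c hc] at hsplit
        omega
    refine ⟨hk1, ?_⟩
    by_contra hno
    push_neg at hno
    apply hcont
    apply hiff.1
    intro j hj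
    exact hno j (Nat.zero_le j) hj

theorem step_eq_counter_step (d : PySem.Dict Char Int) (c : Char) :
    countStep d c = d.modify c 0 (· + 1) := by
  rw [countStep]
  by_cases h : d.contains c
  · simp [h]
  · simp only [h, Bool.false_eq_true, if_false]
    rw [PySem.Dict.modify, PySem.Dict.getD_of_not_contains]
    · norm_num
    · exact Bool.of_not_eq_true h

theorem ofList_append_mem (xs : List Char) (x : Char) (h : x ∈ xs) :
    PySem.Set.ofList (xs ++ [x]) = PySem.Set.ofList xs := by
  rw [PySem.Set.ofList, List.foldl_append]
  simp only [List.foldl_cons, List.foldl_nil, PySem.Set.add, PySem.Set.contains]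
  rw [if_pos]
  · rfl
  · rw [List.contains_iff_mem]
    exact (PySem.Set.mem_ofList xs x).2 h

theorem ofList_append_not_mem (xs : List Char) (x : Char) (h : x ∉ xs) :
    PySem.Set.ofList (xs ++ [x]) = PySem.Set.ofList xs ++ [x] := by
  rw [PySem.Set.ofList, List.foldl_append]
  simp only [List.foldl_cons, List.foldl_nil, PySem.Set.add, PySem.Set.contains]
  rw [if_neg]
  · rfl
  · rw [List.contains_iff_mem]
    intro hm
    exact h ((PySem.Set.mem_ofList xs x).1 hm)

theorem idxOf_of_not_mem_take (l : List Char) (m : Nat) (hmlt : m < l.length)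
    (h : l[m] ∉ l.take m) : l.idxOf l[m] = m := by
  have hmem : l[m] ∈ l := List.getElem_mem hmlt
  have h1 : ¬ l.idxOf l[m] < m := fun hlt =>
    h ((List.mem_take_iff_idxOf_lt hmem).2 hlt)
  have h2 : l[m] ∈ l.take (m + 1) := by
    rw [List.take_succ, List.getElem?_eq_getElem hmlt]
    exact List.mem_append_right _ (List.mem_singleton.2 rfl)
  have h3 := (List.mem_take_iff_idxOf_lt hmem).1 h2
  omega

theorem loopA_eq (l : List Char) (m : Nat) (hm : m ≤ l.length) :
    ∃ d, (List.foldl (fun st (k : Nat) => stepA l st (k : Int)) ([], PySem.Dict.counter l)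
        (List.range m))
      = ((PySem.Set.ofList (l.take m)).filter (condA l), d)
      ∧ ∀ x, d.getD x 0 = if x ∈ l.take m ∧ 1 < l.count x then (-1 : Int) else (l.count x : Int) := by
  induction m with
  | zero =>
    refine ⟨PySem.Dict.counter l, by simp, fun x => ?_⟩
    rw [if_neg (by simp)]
    exact PySem.Dict.getD_counter l x
  | succ m ih =>
    obtain ⟨d, hfold, hd⟩ := ih (by omega)
    rw [List.range_succ, List.foldl_append, List.foldl_cons, List.foldl_nil, hfold]
    have hmlt : m < l.length := by omega
    have hcmem : l[m] ∈ l := List.getElem_mem hmlt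
    have htake : l.take (m + 1) = l.take m ++ [l[m]] := by
      rw [List.take_succ, List.getElem?_eq_getElem hmlt]
      rfl
    have hget : PySem.List.pyGetD l (↑m) ' ' = l[m] := by
      rw [PySem.List.pyGetD_natCast, List.getD_eq_getElem?_getD,
        List.getElem?_eq_getElem hmlt]
      rfl
    simp only [stepA, hget]
    by_cases hmem : l[m] ∈ l.take m
    · -- already processed: dict holds -1, nothing changes
      have hcnt2 : 1 < l.count l[m] := by
        have ha : 0 < (l.take m).count l[m] := List.count_pos_iff.2 hmem
        have hb : (l.take (m + 1)).count l[m] ≤ l.count l[m] :=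
          (List.take_sublist (m + 1) l).count_le _
        rw [htake, List.count_append, List.count_singleton] at hb
        simp at hb
        omega
      rw [hd l[m],
        if_pos (show l[m] ∈ l.take m ∧ 1 < l.count l[m] from ⟨hmem, hcnt2⟩),
        if_pos (show (-1 : Int) = -1 from rfl)]
      refine ⟨d, ?_, ?_⟩
      · rw [htake, ofList_append_mem _ _ hmem]
      · intro x
        rw [hd x, htake]
        have hmm : x ∈ l.take m ++ [l[m]] ↔ x ∈ l.take m := by
          rw [List.mem_append, List.mem_singleton]
          exact ⟨fun h => h.elim id (fun he => he ▸ hmem), Or.inl⟩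
        rw [if_congr (and_congr_left' hmm) rfl rfl]
    · have hidx : l.idxOf l[m] = m := idxOf_of_not_mem_take l m hmlt hmem
      have hcnt1 : 0 < l.count l[m] := List.count_pos_iff.2 hcmem
      rw [hd l[m],
        if_neg (show ¬ (l[m] ∈ l.take m ∧ 1 < l.count l[m]) from fun hco => hmem hco.1),
        if_neg (show ¬ ((l.count l[m] : Int) = -1) from by omega)]
      by_cases h2 : 1 < l.count l[m]
      · rw [if_pos (show (1 : Int) < (l.count l[m] : Int) from by exact_mod_cast h2)]
        have htn : (↑m : Int).toNat = m := Int.toNat_natCast m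
        have hktn : ((l.count l[m] : Int)).toNat = l.count l[m] := Int.toNat_natCast _
        rw [htn, hktn]
        have hcond : condA l l[m] = innerLoopA l l[m] m (l.count l[m]) 0 := by
          rw [condA, hidx, decide_eq_true h2, Bool.true_and]
        refine ⟨d.insert l[m] (-1), ?_, ?_⟩
        · rw [htake, ofList_append_not_mem _ _ hmem, List.filter_append, List.filter_singleton]
          rw [hcond]
          by_cases hil : innerLoopA l l[m] m (l.count l[m]) 0
          · rw [if_pos hil, hil, Bool.cond_true]
          · simp only [Bool.not_eq_true] at hil
            rw [hil, if_neg (show ¬ (false = true) from by simp), Bool.cond_false,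
              List.append_nil]
        · intro x
          rw [PySem.Dict.getD_insert]
          by_cases hx : x = l[m]
          · rw [if_pos hx,
              if_pos (show x ∈ l.take (m + 1) ∧ 1 < l.count x from
                ⟨by rw [hx, htake]; exact List.mem_append_right _ (List.mem_singleton.2 rfl),
                 by rw [hx]; exact h2⟩)]
          · rw [if_neg hx, hd x, htake]
            have hmm : x ∈ l.take m ++ [l[m]] ↔ x ∈ l.take m := by
              rw [List.mem_append, List.mem_singleton]
              exact ⟨fun h => h.resolve_right hx, Or.inl⟩
            rw [if_congr (and_congr_left' hmm) rfl rfl]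
      · rw [if_neg (show ¬ ((1 : Int) < (l.count l[m] : Int)) from by exact_mod_cast h2)]
        have hcond : condA l l[m] = false := by
          rw [condA, decide_eq_false h2, Bool.false_and]
        refine ⟨d, ?_, ?_⟩
        · rw [htake, ofList_append_not_mem _ _ hmem, List.filter_append, List.filter_singleton,
            hcond, Bool.cond_false, List.append_nil]
        · intro x
          rw [hd x, htake]
          by_cases hx : x = l[m]
          · subst hx
            rw [if_neg (show ¬ (l[m] ∈ l.take m ++ [l[m]] ∧ 1 < l.count l[m]) from
                fun hco => h2 hco.2),
              if_neg (show ¬ (l[m] ∈ l.take m ∧ 1 < l.count l[m]) from fun hco => hmem hco.1)]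
          · have hmm : x ∈ l.take m ++ [l[m]] ↔ x ∈ l.take m := by
              rw [List.mem_append, List.mem_singleton]
              exact ⟨fun h => h.resolve_right hx, Or.inl⟩
            rw [if_congr (and_congr_left' hmm) rfl rfl]

theorem runs_gt_one_iff (l : List Char) (x : Char) (hx : x ∈ l) :
    1 < (runsD l).count x ↔ ¬ Contig l x := by
  have hpos : 0 < (runsD l).count x := List.count_pos_iff.2 ((mem_runsD l x).2 hx)
  have h1 := runsD_count_one_iff l x hx
  constructor
  · intro h hcont
    have := h1.2 hcont
    omega
  · intro h
    rcases Nat.lt_or_ge 1 ((runsD l).count x) with hgt | hle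
    · exact hgt
    · exact absurd (h1.1 (by omega)) h

-- ===== VERDICT (by name: the statement is the Claim_ definition above) =====
theorem solution_spec : Claim_equal_solution := by
  unfold Claim_equal_solution
  intro s _hdom
  unfold Spec_solution
  simp only [solution, solution_alt]
  rw [runs_foldl_eq]
  -- first loop is the counter
  have h1 : (PySem.List.pyRange 0 (PySem.Chars.len s.toList) 1).foldl
      (fun d i => countStep d (PySem.List.pyGetD s.toList i ' '))
      PySem.Dict.empty = PySem.Dict.counter s.toList := by
    rw [PySem.Chars.len_eq]
    rw [PySem.List.foldl_pyRange_zero_pyGetD' s.toList ' ' countStep PySem.Dict.empty]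
    rw [funext (fun d => funext (fun c => step_eq_counter_step d c))]
    rfl
  rw [h1]
  -- second loop
  rw [PySem.Chars.len_eq, PySem.List.pyRange_zero_nat, List.foldl_map]
  obtain ⟨d, hfold, _⟩ := loopA_eq s.toList s.toList.length le_rfl
  rw [List.take_length] at hfold
  simp only [hfold]
  -- the two collected lists are permutations of each other
  set l := s.toList with hldef
  have hnodA : ((PySem.Set.ofList l).filter (condA l)).Nodup :=
    (PySem.Set.nodup_ofList l).filter _
  have hnodB : (PySem.Set.ofList ((runsD l).filter (fun c => decide (1 < (runsD l).count c)))).Nodup :=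
    PySem.Set.nodup_ofList _
  have hperm : ((PySem.Set.ofList l).filter (condA l)).Perm
      (PySem.Set.ofList ((runsD l).filter (fun c => decide (1 < (runsD l).count c)))) := by
    apply (List.perm_ext_iff_of_nodup hnodA hnodB).2
    intro x
    rw [List.mem_filter, PySem.Set.mem_ofList, PySem.Set.mem_ofList, List.mem_filter,
      mem_runsD]
    constructor
    · rintro ⟨hxl, hcond⟩
      have hnc := (condA_iff_not_contig l x hxl).1 hcond
      exact ⟨hxl, decide_eq_true ((runs_gt_one_iff l x hxl).2 hnc)⟩
    · rintro ⟨hxl, hgt⟩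
      have hnc := (runs_gt_one_iff l x hxl).1 (of_decide_eq_true hgt)
      exact ⟨hxl, (condA_iff_not_contig l x hxl).2 hnc⟩
  have hlen := hperm.length_eq
  by_cases hA : (PySem.Set.ofList l).filter (condA l) = []
  · rw [if_pos hA,
      if_pos (List.eq_nil_of_length_eq_zero (by rw [← hlen, hA]; rfl))]
  · rw [if_neg hA,
      if_neg (fun hB => hA (List.eq_nil_of_length_eq_zero (by rw [hlen, hB]; rfl)))]
    exact congrArg String.ofList
      (PySem.List.sorted_eq_sorted_of_perm _ _ (fun x => x) (fun a b h => h) hperm)
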